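-- pv_equiv track=rewrite | github.com/ciaochiaociao/nlds | nlu/parser_utils.py | iob22bioes
-- ===== SOURCE A (Python) =====
-- def iob22bioes(tags):
--     """
--     IOB -> IOBES
--     .. seealso:: modified from `https://github.com/flairNLP/flair/blob/master/flair/data.py <https://github.com/flairNLP/flair/blob/master/flair/data.py>`_.
--     """
--     new_tags = []
--     for i, tag in enumerate(tags):
--         if tag == "O":
--             new_tags.append(tag)
--         elif tag.split("-")[0] == "B":
--             if i + 1 != len(tags) and tags[i + 1].split("-")[0] == "I":
--                 # (cwhsu) not reaching the right boundary (not EOE, not End Of an Entity)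
--                 # note -        EOE:    EOS     OR      the next tag is not 'I' ('B-X' or 'O')
--                 #           not EOE: not EOS    AND     the next tag is     'I' ('B-X' or 'O')
--                 new_tags.append(tag)
--             else:
--                 # (cwhsu) convert 'B' to 'S' when it's EOE
--                 new_tags.append(tag.replace("B-", "S-"))
--         elif tag.split("-")[0] == "I":
--             if i + 1 < len(tags) and tags[i + 1].split("-")[0] == "I":
--                 new_tags.append(tag)
--             else:  # (cwhsu) convert 'I' to 'E' when it's EOE
--                 new_tags.append(tag.replace("I-", "E-"))
--         else:
--             raise Exception("Invalid IOB format!")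
--     return new_tags
-- ===== SOURCE B (Python) =====
-- def iob22bioes(tags):
--     """IOB -> IOBES, chunk-based: split into segments first, then fix only each segment's last tag."""
--     new_tags = []
--     rest = tags
--     while rest:
--         tag = rest[0]
--         if tag == "O":
--             new_tags.append("O")
--             rest = rest[1:]
--             continue
--         if tag.split("-")[0] not in ("B", "I"):
--             raise Exception("Invalid IOB format!")
--         k = 1
--         while k < len(rest) and rest[k].split("-")[0] == "I":
--             k += 1
--         chunk = rest[:k]
--         new_tags.extend(chunk[:-1])
--         last = chunk[-1]
--         if last.split("-")[0] == "B":
--             new_tags.append(last.replace("B-", "S-"))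
--         else:
--             new_tags.append(last.replace("I-", "E-"))
--         rest = rest[k:]
--     return new_tags
-- ===== Notes on version B (the rewrite author's own statement) =====
-- stated objective: alternative
-- what changed: B first splits the tag sequence into chunks (an 'O' alone; otherwise a chunk starts at the current tag and greedily absorbs following tags whose prefix before '-' is 'I') and then emits each chunk unchanged except for a replace on its last tag, instead of A's per-index lookahead at tags[i+1].
import Mathlib
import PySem

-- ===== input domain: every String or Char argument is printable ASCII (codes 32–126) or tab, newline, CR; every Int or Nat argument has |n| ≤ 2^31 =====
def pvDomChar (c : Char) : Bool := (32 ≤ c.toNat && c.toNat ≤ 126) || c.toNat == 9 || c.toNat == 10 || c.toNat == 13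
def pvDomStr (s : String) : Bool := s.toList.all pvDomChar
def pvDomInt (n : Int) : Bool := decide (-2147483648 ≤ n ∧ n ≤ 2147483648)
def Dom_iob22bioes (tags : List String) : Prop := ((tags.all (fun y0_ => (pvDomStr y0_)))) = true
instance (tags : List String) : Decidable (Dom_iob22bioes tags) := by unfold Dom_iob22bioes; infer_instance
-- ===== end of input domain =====

-- B rebuilds the sequence chunk by chunk (segments ended before a non-'I' tag) and fixes only each
-- chunk's last tag, instead of A's per-index next-tag lookahead; alternative decomposition, same cost.

-- ===== PORT A =====
-- tag.split("-")[0]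
def pvPref (t : String) : String := ((PySem.Str.split? t "-").getD []).headD ""

-- tags[j].split("-")[0] == "I"  (only consulted with j in range; none cannot occur there)
def pvLookI (tags : List String) (j : Int) : Bool :=
  match PySem.List.pyGet? tags j with
  | some u => pvPref u == "I"
  | none => false

-- the loop body of A, one enumerate step (i, tag)
def pvStepA (tags : List String) (new_tags : List String) (p : Int × String) : List String :=
  let i := p.1
  let tag := p.2
  if tag = "O" then new_tags ++ [tag]
  else if pvPref tag = "B" then
    if i + 1 ≠ (tags.length : Int) ∧ pvLookI tags (i + 1) = true then
      new_tags ++ [tag]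
    else
      new_tags ++ [PySem.Str.replace tag "B-" "S-"]
  else if pvPref tag = "I" then
    if i + 1 < (tags.length : Int) ∧ pvLookI tags (i + 1) = true then
      new_tags ++ [tag]
    else
      new_tags ++ [PySem.Str.replace tag "I-" "E-"]
  else new_tags  -- Python: raise Exception("Invalid IOB format!") — excluded by Pre_

def iob22bioes (tags : List String) : List String :=
  (PySem.List.enumerate tags 0).foldl (pvStepA tags) []

-- ===== PORT B =====
def iob22bioesLoop (new_tags : List String) (rest : List String) : List String :=
  match rest with
  | [] => new_tags
  | tag :: rs =>
    if tag = "O" then iob22bioesLoop (new_tags ++ ["O"]) rs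
    else if pvPref tag = "B" ∨ pvPref tag = "I" then
      let body := rs.takeWhile (fun u => pvPref u == "I")
      let chunk := tag :: body
      let last := chunk.getLastD ""
      let out := if pvPref last = "B" then PySem.Str.replace last "B-" "S-"
                 else PySem.Str.replace last "I-" "E-"
      iob22bioesLoop (new_tags ++ chunk.dropLast ++ [out]) (rs.drop body.length)
    else new_tags  -- Python: raise Exception("Invalid IOB format!") — excluded by Pre_
termination_by rest.length

def iob22bioes_alt (tags : List String) : List String := iob22bioesLoop [] tags

-- ===== PRECONDITION & SPEC =====
-- Pre_ excludes exactly the inputs on which Python A raises Exception("Invalid IOB format!"):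
-- some tag is neither "O" nor has prefix (before '-') "B" or "I".  B raises there too.
def Pre_iob22bioes (tags : List String) : Prop :=
  ∀ t ∈ tags, t = "O" ∨ pvPref t = "B" ∨ pvPref t = "I"
instance (tags : List String) : Decidable (Pre_iob22bioes tags) := by unfold Pre_iob22bioes; infer_instance
def pvWitness_iob22bioes : List String := ["B-PER", "I-PER", "O", "I-LOC", "B-ORG"]

def Spec_iob22bioes (tags : List String) (out : List String) : Prop := out = iob22bioes_alt tags
instance (tags : List String) (out : List String) : Decidable (Spec_iob22bioes tags out) := by unfold Spec_iob22bioes; infer_instance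

-- ===== CLAIM (what is proved, stated in full; the proofs are below) =====
def Claim_equal_iob22bioes : Prop := ∀ (tags : List String), Dom_iob22bioes tags → Pre_iob22bioes tags → Spec_iob22bioes tags (iob22bioes tags)

-- ===== LEMMAS AND PROOFS =====

-- the common specification both ports are reduced to: each tag rewritten by whether the next tag's prefix is "I"
def pvNextI : List String → Bool
  | [] => false
  | u :: _ => pvPref u == "I"

def pvG (t : String) (nI : Bool) : String :=
  if t = "O" then t
  else if pvPref t = "B" then (if nI then t else PySem.Str.replace t "B-" "S-")
  else (if nI then t else PySem.Str.replace t "I-" "E-")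

def pvMap : List String → List String
  | [] => []
  | t :: rest => pvG t (pvNextI rest) :: pvMap rest

-- general list facts the chunk proof needs (not found in Mathlib by exact?)
theorem pvDrop_takeWhile_length {α : Type} (p : α → Bool) (l : List α) :
    l.drop (l.takeWhile p).length = l.dropWhile p := by
  induction l with
  | nil => simp
  | cons a l ih => by_cases h : p a <;> simp [List.takeWhile, List.dropWhile, h, ih]

theorem pvHead?_dropWhile {α : Type} (p : α → Bool) (l : List α) (u : α)
    (h : (l.dropWhile p).head? = some u) : p u = false := by
  induction l with
  | nil => simp at h
  | cons a l ih =>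
    by_cases hp : p a
    · simp [List.dropWhile, hp] at h; exact ih h
    · simp [List.dropWhile, hp] at h; subst h; simpa using hp

theorem pvPref_O : pvPref "O" = "O" := by decide

theorem pvG_true (t : String) : pvG t true = t := by simp [pvG]

theorem pvG_false (t : String) (ht : t ≠ "O") :
    pvG t false = if pvPref t = "B" then PySem.Str.replace t "B-" "S-"
                  else PySem.Str.replace t "I-" "E-" := by
  simp [pvG, ht]

theorem pvMap_chunk (t : String) (body rest2 : List String)
    (ht : t ≠ "O")
    (hb : ∀ u ∈ body, (pvPref u == "I") = true)
    (hr : pvNextI rest2 = false) :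
    pvMap (t :: (body ++ rest2)) =
      (t :: body).dropLast ++
        ((if pvPref ((t :: body).getLastD "") = "B"
            then PySem.Str.replace ((t :: body).getLastD "") "B-" "S-"
            else PySem.Str.replace ((t :: body).getLastD "") "I-" "E-") :: pvMap rest2) := by
  induction body generalizing t with
  | nil =>
    simp [pvMap, hr, pvG_false t ht]
  | cons u body ih =>
    have hu : (pvPref u == "I") = true := hb u (by simp)
    have hu' : u ≠ "O" := by
      intro e; rw [e, pvPref_O] at hu; simp at hu
    have lhs : pvMap (t :: u :: (body ++ rest2)) =
        t :: pvMap (u :: (body ++ rest2)) := by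
      simp only [pvMap, pvNextI, hu, pvG_true]
    rw [List.cons_append, lhs,
        ih u hu' (fun v hv => hb v (by simp [hv])),
        List.dropLast_cons₂, List.getLastD_cons]
    cases body with
    | nil => simp
    | cons a l =>
      obtain ⟨x, hx⟩ : ∃ x, (a :: l).getLast? = some x :=
        Option.isSome_iff_exists.mp (by simp [List.getLast?_isSome])
      simp [hx]

theorem pvLoopB : ∀ (rest acc : List String),
    (∀ t ∈ rest, t = "O" ∨ pvPref t = "B" ∨ pvPref t = "I") →
    iob22bioesLoop acc rest = acc ++ pvMap rest
  | [], acc, _ => by simp [iob22bioesLoop, pvMap]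
  | tag :: rs, acc, h => by
    by_cases hO : tag = "O"
    · subst hO
      rw [iob22bioesLoop]
      rw [pvLoopB rs (acc ++ ["O"]) (fun t ht => h t (by simp [ht]))]
      simp [pvMap, pvG]
    · have hBI : pvPref tag = "B" ∨ pvPref tag = "I" := (h tag (by simp)).resolve_left hO
      rw [iob22bioesLoop]
      simp only [if_neg hO, if_pos hBI]
      rw [pvLoopB (rs.drop (rs.takeWhile (fun u => pvPref u == "I")).length) _
            (fun t ht => h t (by simp [List.mem_of_mem_drop ht]))]
      have hsplit : tag :: rs =
          tag :: (rs.takeWhile (fun u => pvPref u == "I") ++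
            rs.drop (rs.takeWhile (fun u => pvPref u == "I")).length) := by
        rw [pvDrop_takeWhile_length]; simp
      have hr : pvNextI (rs.drop (rs.takeWhile (fun u => pvPref u == "I")).length) = false := by
        rw [pvDrop_takeWhile_length]
        cases hcase : rs.dropWhile (fun u => pvPref u == "I") with
        | nil => simp [pvNextI]
        | cons v l =>
          have hv : (pvPref v == "I") = false :=
            pvHead?_dropWhile _ rs v (by rw [hcase]; rfl)
          simp [pvNextI, hv]
      have hb : ∀ u ∈ rs.takeWhile (fun u => pvPref u == "I"), (pvPref u == "I") = true := by
        intro u hu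
        exact List.mem_takeWhile_imp (p := fun u => pvPref u == "I") (l := rs) hu
      conv_rhs => rw [hsplit]
      rw [pvMap_chunk tag _ _ hO hb hr]
      simp
  termination_by rest _ _ => rest.length
  decreasing_by
    all_goals (simp only [List.length_drop, List.length_cons]; omega)

theorem pvB_eq_pvMap (tags : List String) (h : Pre_iob22bioes tags) :
    iob22bioes_alt tags = pvMap tags := by
  rw [iob22bioes_alt, pvLoopB tags [] h]; simp

theorem pvPref_O_ne_B : pvPref "O" ≠ "B" := by decide
theorem pvPref_O_ne_I : pvPref "O" ≠ "I" := by decide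

theorem pvFoldA (tags : List String) : ∀ (suf pre acc : List String),
    tags = pre ++ suf →
    (∀ t ∈ suf, t = "O" ∨ pvPref t = "B" ∨ pvPref t = "I") →
    (PySem.List.enumerate suf ((pre.length : Nat) : Int)).foldl (pvStepA tags) acc
      = acc ++ pvMap suf := by
  intro suf
  induction suf with
  | nil => intro pre acc _ _; simp [PySem.List.enumerate_nil, pvMap]
  | cons t rs ih =>
    intro pre acc htags h
    have hgood := h t (by simp)
    have hget : PySem.List.pyGet? tags ((pre.length : Int) + 1) = rs.head? := by
      subst htags
      have hc : ((pre.length : Int) + 1) = ((pre.length + 1 : Nat) : Int) := by push_cast; ring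
      rw [hc, PySem.List.pyGet?_natCast, List.getElem?_append_right (by omega)]
      simp [List.head?_eq_getElem?]
    have hlen : (tags.length : Int) = (pre.length : Int) + (rs.length : Int) + 1 := by
      subst htags; simp [List.length_append]; ring
    have hLook : pvLookI tags ((pre.length : Int) + 1) = pvNextI rs := by
      unfold pvLookI
      cases rs with
      | nil => simp [hget, pvNextI]
      | cons u rs' => simp [hget, pvNextI]
    have hne_iff : rs ≠ [] → ((pre.length : Int) + 1 ≠ (tags.length : Int)) := by
      intro hrs; rw [hlen]; cases rs with
      | nil => exact absurd rfl hrs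
      | cons u rs' => simp only [List.length_cons]; push_cast; omega
    have hlt_iff : rs ≠ [] → ((pre.length : Int) + 1 < (tags.length : Int)) := by
      intro hrs; rw [hlen]; cases rs with
      | nil => exact absurd rfl hrs
      | cons u rs' => simp only [List.length_cons]; push_cast; omega
    have hkey : pvStepA tags acc ((pre.length : Int), t) = acc ++ [pvG t (pvNextI rs)] := by
      rcases hgood with hO | hBI
      · subst hO; simp [pvStepA, pvG]
      · have ht' : t ≠ "O" := by
          intro e; rw [e] at hBI
          rcases hBI with h' | h'
          · exact pvPref_O_ne_B h'
          · exact pvPref_O_ne_I h'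
        cases hn : pvNextI rs with
        | true =>
          have hrs : rs ≠ [] := by
            cases rs with
            | nil => simp [pvNextI] at hn
            | cons u rs' => simp
          rcases hBI with hB | hI
          · show pvStepA tags acc ((pre.length : Int), t) = acc ++ [pvG t true]
            unfold pvStepA
            simp only
            rw [if_neg ht', if_pos hB, if_pos ⟨hne_iff hrs, by rw [hLook, hn]⟩, pvG_true]
          · have hnB : pvPref t ≠ "B" := by rw [hI]; decide
            show pvStepA tags acc ((pre.length : Int), t) = acc ++ [pvG t true]
            unfold pvStepA
            simp only
            rw [if_neg ht', if_neg hnB, if_pos hI,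
                if_pos ⟨hlt_iff hrs, by rw [hLook, hn]⟩, pvG_true]
        | false =>
          rcases hBI with hB | hI
          · show pvStepA tags acc ((pre.length : Int), t) = acc ++ [pvG t false]
            unfold pvStepA
            simp only
            rw [if_neg ht', if_pos hB,
                if_neg (fun hc => by rw [hLook, hn] at hc; exact absurd hc.2 (by simp)),
                pvG_false t ht', if_pos hB]
          · have hnB : pvPref t ≠ "B" := by rw [hI]; decide
            show pvStepA tags acc ((pre.length : Int), t) = acc ++ [pvG t false]
            unfold pvStepA
            simp only
            rw [if_neg ht', if_neg hnB, if_pos hI,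
                if_neg (fun hc => by rw [hLook, hn] at hc; exact absurd hc.2 (by simp)),
                pvG_false t ht', if_neg hnB]
    rw [PySem.List.enumerate_cons, List.foldl_cons]
    have hcast : (pre.length : Int) + 1 = (((pre ++ [t]).length : Nat) : Int) := by
      simp
    rw [hcast, ih (pre ++ [t]) _ (by rw [htags]; simp) (fun v hv => h v (by simp [hv])), hkey]
    simp [pvMap]

theorem pvA_eq_pvMap (tags : List String) (h : Pre_iob22bioes tags) :
    iob22bioes tags = pvMap tags := by
  have := pvFoldA tags tags [] [] (by simp) h
  simpa [iob22bioes] using this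

-- ===== VERDICT (by name: the statement is the Claim_ definition above) =====
theorem iob22bioes_spec : Claim_equal_iob22bioes := by
  intro tags _ hpre
  unfold Spec_iob22bioes
  rw [pvA_eq_pvMap tags hpre, pvB_eq_pvMap tags hpre]
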